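-- pv_equiv track=rewrite | github.com/justinespinal/Python-Functions-Sets-Sums-and-Matrices | Assignment2.py | set_symmetric_difference
-- ===== SOURCE A (Python) =====
-- def set_symmetric_difference(set1, set2):
--     set3 = set()
--     for s in set1:
--         if s not in set2:
--             set3.add(s)
--     for s in set2:
--         if s not in set1:
--             set3.add(s)
--     return set3
-- ===== SOURCE B (Python) =====
-- def set_symmetric_difference(set1, set2):
--     u = set(set1) | set(set2)
--     return {s for s in u if (s in set1) != (s in set2)}
-- ===== Notes on version B (the rewrite author's own statement) =====
-- stated objective: simpler
-- what changed: Replaces A's two directional difference loops with one union construction plus a single XOR-membership filter pass over the union.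
import Mathlib
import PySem

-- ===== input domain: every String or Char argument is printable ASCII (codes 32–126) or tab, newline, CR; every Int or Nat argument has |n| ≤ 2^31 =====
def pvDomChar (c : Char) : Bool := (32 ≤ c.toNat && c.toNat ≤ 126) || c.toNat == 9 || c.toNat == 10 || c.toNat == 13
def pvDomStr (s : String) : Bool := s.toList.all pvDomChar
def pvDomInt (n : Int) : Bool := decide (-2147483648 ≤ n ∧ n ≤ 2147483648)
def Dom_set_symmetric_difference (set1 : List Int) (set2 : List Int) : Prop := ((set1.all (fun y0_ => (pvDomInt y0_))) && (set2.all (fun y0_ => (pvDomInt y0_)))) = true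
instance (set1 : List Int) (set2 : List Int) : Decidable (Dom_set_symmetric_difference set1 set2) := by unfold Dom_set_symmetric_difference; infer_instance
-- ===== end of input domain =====

-- B replaces A's two directional difference loops by one union plus a single
-- XOR-membership filter pass (objective: simpler). Return-value equivalence only
-- (the Python outputs are sets; ports realise the modelled insertion order).

-- ===== PORT A =====
-- A: set3 = set(); for s in set1: if s not in set2: set3.add(s);
--    for s in set2: if s not in set1: set3.add(s); return set3
def set_symmetric_difference (set1 : List Int) (set2 : List Int) : List Int :=
  let set3 : PySem.Set Int := PySem.Set.empty
  let set3 := set1.foldl (fun acc s => if set2.contains s then acc else PySem.Set.add acc s) set3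
  let set3 := set2.foldl (fun acc s => if set1.contains s then acc else PySem.Set.add acc s) set3
  set3

-- ===== PORT B =====
-- B: u = set(set1) | set(set2); return {s for s in u if (s in set1) != (s in set2)}
def set_symmetric_difference_alt (set1 : List Int) (set2 : List Int) : List Int :=
  let u : PySem.Set Int := PySem.Set.union (PySem.Set.ofList set1) set2
  u.filter (fun s => set1.contains s != set2.contains s)

-- ===== PRECONDITION & SPEC =====
def Spec_set_symmetric_difference (set1 : List Int) (set2 : List Int) (out : List Int) : Prop := out = set_symmetric_difference_alt set1 set2
instance (set1 : List Int) (set2 : List Int) (out : List Int) : Decidable (Spec_set_symmetric_difference set1 set2 out) := by unfold Spec_set_symmetric_difference; infer_instance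

-- ===== CLAIM (what is proved, stated in full; the proofs are below) =====
def Claim_equal_set_symmetric_difference : Prop := ∀ (set1 : List Int) (set2 : List Int), Dom_set_symmetric_difference set1 set2 → Spec_set_symmetric_difference set1 set2 (set_symmetric_difference set1 set2)

-- ===== LEMMAS AND PROOFS =====

-- A conditional-add loop is a plain add-fold over the filtered list.
theorem foldl_ite_add (q : Int → Bool) (xs : List Int) (acc : List Int) :
    xs.foldl (fun acc s => if q s then acc else PySem.Set.add acc s) acc
      = (xs.filter (fun s => !q s)).foldl PySem.Set.add acc := by
  induction xs generalizing acc with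
  | nil => rfl
  | cons x xs ih =>
      by_cases h : q x <;> simp [List.foldl_cons, h, ih]

-- Adding elements disjoint from a prefix `a` only extends the suffix.
theorem foldl_add_disjoint (v : List Int) (a b : List Int)
    (h : ∀ x ∈ v, x ∉ a) :
    v.foldl PySem.Set.add (a ++ b) = a ++ v.foldl PySem.Set.add b := by
  induction v generalizing b with
  | nil => rfl
  | cons x v ih =>
      have hx : x ∉ a := h x (List.mem_cons_self)
      have hrest : ∀ y ∈ v, y ∉ a := fun y hy => h y (List.mem_cons_of_mem _ hy)
      have hadd : PySem.Set.add (a ++ b) x = a ++ PySem.Set.add b x := by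
        rw [PySem.Set.add_eq_ite, PySem.Set.add_eq_ite]
        by_cases hb : x ∈ b
        · simp [hb, hx]
        · simp [hb, hx]
      simp only [List.foldl_cons, hadd, ih _ hrest]

-- Dedup (set construction) commutes with a filter.
theorem ofList_filter (p : Int → Bool) (xs : List Int) :
    PySem.Set.ofList (xs.filter p) = (PySem.Set.ofList xs).filter p := by
  induction xs with
  | nil => rfl
  | cons x xs ih =>
      by_cases hp : p x
      · rw [List.filter_cons_of_pos hp, PySem.Set.ofList_cons, PySem.Set.ofList_cons,
          ih]
        simp only [PySem.Set.discard, List.filter_cons_of_pos hp, List.filter_filter]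
        congr 1
        exact List.filter_congr (fun y _ => Bool.and_comm ..)
      · rw [List.filter_cons_of_neg hp, PySem.Set.ofList_cons, ih]
        simp only [PySem.Set.discard, List.filter_cons_of_neg hp, List.filter_filter]
        refine (List.filter_congr (fun y _ => ?_)).symm
        by_cases hyx : y = x
        · subst hyx; simp [hp]
        · simp [hyx]

-- ===== VERDICT (by name: the statement is the Claim_ definition above) =====
theorem set_symmetric_difference_spec : Claim_equal_set_symmetric_difference := by
  intro set1 set2 _
  unfold Spec_set_symmetric_difference set_symmetric_difference set_symmetric_difference_alt
  simp only []
  -- predicates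
  have hq1 : set1.filter (fun s => !set2.contains s)
      = set1.filter (fun s => set1.contains s != set2.contains s) :=
    (List.filter_congr (fun y hy => by simp [hy])).symm
  have hq2 : set2.filter (fun s => !set1.contains s)
      = set2.filter (fun s => set1.contains s != set2.contains s) :=
    (List.filter_congr (fun y hy => by simp [hy])).symm
  set p : Int → Bool := fun s => set1.contains s != set2.contains s with hp
  -- A's side
  rw [foldl_ite_add, foldl_ite_add, hq1, hq2]
  have hA1 : (set1.filter p).foldl PySem.Set.add PySem.Set.empty
      = PySem.Set.ofList (set1.filter p) := rfl
  rw [hA1]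
  have hdis2 : ∀ x ∈ set2.filter p, x ∉ PySem.Set.ofList (set1.filter p) := by
    intro x hx
    have hx2 : x ∈ set2 := List.mem_of_mem_filter hx
    have hpx : p x = true := List.of_mem_filter hx
    have h1 : x ∉ set1 := by rw [hp] at hpx; simpa [hx2] using hpx
    intro hmem
    have hmf : x ∈ set1.filter p := by simpa [PySem.Set.mem_ofList] using hmem
    exact h1 (List.mem_of_mem_filter hmf)
  have hA : (set2.filter p).foldl PySem.Set.add (PySem.Set.ofList (set1.filter p))
      = PySem.Set.ofList (set1.filter p) ++ PySem.Set.ofList (set2.filter p) := by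
    have := foldl_add_disjoint (set2.filter p) (PySem.Set.ofList (set1.filter p)) [] hdis2
    simpa [PySem.Set.ofList] using this
  rw [hA]
  -- B's side
  have hB : (PySem.Set.union (PySem.Set.ofList set1) set2).filter p
      = PySem.Set.ofList (set1.filter p) ++ PySem.Set.ofList (set2.filter p) := by
    have hu : PySem.Set.union (PySem.Set.ofList set1) set2
        = PySem.Set.ofList (set1 ++ set2) := by
      simp [PySem.Set.union, PySem.Set.ofList_append]
    rw [hu, ← ofList_filter, List.filter_append, PySem.Set.ofList_append]
    show (set2.filter p).foldl PySem.Set.add (PySem.Set.ofList (set1.filter p)) = _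
    have := foldl_add_disjoint (set2.filter p) (PySem.Set.ofList (set1.filter p)) [] hdis2
    simpa [PySem.Set.ofList] using this
  rw [hB]
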